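-- pv_equiv track=rewrite | github.com/dendrite-bci/dendrite | src/dendrite/data/lsl_helpers.py | infer_channel_types_from_labels
-- ===== SOURCE A (Python) =====
-- def infer_channel_types_from_labels(labels: list[str], default_type: str = "EEG") -> list[str]:
--     """
--     Infer channel types based on channel labels using pattern matching.
--
--     This ensures consistent channel type inference across all parts of the system.
--     Channels with specific patterns in their labels are automatically assigned
--     appropriate types (AUX, EOG, EMG, etc.).
--
--     Args:
--         labels: List of channel labels
--         default_type: Default type to use if no pattern matches
--
--     Returns:
--         List of inferred channel types matching the input labels
--     """
--     inferred_types = []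
--
--     for label in labels:
--         label_upper = label.upper().strip()
--
--         # AUX patterns - check first before other patterns
--         if any(pattern in label_upper for pattern in ["AUX", "AUXILIARY"]):
--             inferred_types.append("AUX")
--         # EOG patterns
--         elif any(pattern in label_upper for pattern in ["VEOG", "VEOGL", "VEOGR"]):
--             inferred_types.append("VEOG")
--         elif any(pattern in label_upper for pattern in ["HEOG", "HEOGL", "HEOGR"]):
--             inferred_types.append("HEOG")
--         elif "EOG" in label_upper:
--             inferred_types.append("EOG")
--         # Other patterns
--         elif any(pattern in label_upper for pattern in ["EMG", "MUSCLE"]):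
--             inferred_types.append("EMG")
--         elif any(pattern in label_upper for pattern in ["ECG", "EKG"]):
--             inferred_types.append("ECG")
--         elif any(
--             pattern in label_upper for pattern in ["STIM", "STI", "TRIGGER", "EVENT", "MARKER"]
--         ):
--             inferred_types.append("Markers")
--         # Default to EEG for electrode-like names or specified default
--         elif any(
--             pattern in label_upper
--             for pattern in ["FP", "F", "C", "P", "O", "T", "AF", "FC", "CP", "PO", "TP", "Z"]
--         ):
--             inferred_types.append("EEG")
--         else:
--             inferred_types.append(default_type)
--
--     return inferred_types
-- ===== SOURCE B (Python) =====
-- TYPES = ["AUX", "VEOG", "HEOG", "EOG", "EMG", "ECG", "Markers", "EEG"]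
--
-- RANK = {
--     "AUX": 0, "AUXILIARY": 0,
--     "VEOG": 1, "VEOGL": 1, "VEOGR": 1,
--     "HEOG": 2, "HEOGL": 2, "HEOGR": 2,
--     "EOG": 3,
--     "EMG": 4, "MUSCLE": 4,
--     "ECG": 5, "EKG": 5,
--     "STIM": 6, "STI": 6, "TRIGGER": 6, "EVENT": 6, "MARKER": 6,
--     "FP": 7, "F": 7, "C": 7, "P": 7, "O": 7, "T": 7,
--     "AF": 7, "FC": 7, "CP": 7, "PO": 7, "TP": 7, "Z": 7,
-- }
--
-- LENGTHS = [1, 2, 3, 4, 5, 6, 7, 9]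
--
--
-- def infer_channel_types_from_labels(labels: list[str], default_type: str = "EEG") -> list[str]:
--     out = []
--     for label in labels:
--         u = label.upper().strip()
--         best = len(TYPES)
--         for i in range(len(u)):
--             for n in LENGTHS:
--                 r = RANK.get(u[i : i + n])
--                 if r is not None and r < best:
--                     best = r
--         out.append(TYPES[best] if best < len(TYPES) else default_type)
--     return out
-- ===== Notes on version B (the rewrite author's own statement) =====
-- stated objective: alternative
-- what changed: Instead of searching each of the 30 fixed patterns inside the label (cascade of substring searches), B slides a window over the label itself, looks every substring of a pattern length up in a hash map pattern->priority, and keeps the minimum priority found; the answer is the type of that priority (or the default).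
import Mathlib
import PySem

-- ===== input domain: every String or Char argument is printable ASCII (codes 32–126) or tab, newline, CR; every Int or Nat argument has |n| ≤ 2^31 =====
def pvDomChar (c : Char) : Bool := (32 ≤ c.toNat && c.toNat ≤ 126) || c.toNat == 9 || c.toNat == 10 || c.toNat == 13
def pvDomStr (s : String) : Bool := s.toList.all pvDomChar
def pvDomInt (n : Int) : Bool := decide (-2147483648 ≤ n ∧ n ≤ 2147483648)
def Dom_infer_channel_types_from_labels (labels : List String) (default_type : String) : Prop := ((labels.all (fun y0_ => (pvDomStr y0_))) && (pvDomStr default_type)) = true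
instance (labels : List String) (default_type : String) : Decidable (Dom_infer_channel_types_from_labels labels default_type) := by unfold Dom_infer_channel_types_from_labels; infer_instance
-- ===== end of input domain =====

-- B replaces A's per-pattern substring searches by the opposite scan: it slides a window over
-- the label and looks every substring of a pattern length up in a hash map pattern -> priority,
-- keeping the minimum priority found (an 'alternative' algorithm of similar cost, not faster).

-- ===== PORT A =====
-- A's per-label elif cascade on u = label.upper().strip(), transliterated branch for branch
def pvCascadeA (u : String) (default_type : String) : String :=
  if ["AUX", "AUXILIARY"].any (fun p => PySem.Str.isIn p u) then "AUX"
  else if ["VEOG", "VEOGL", "VEOGR"].any (fun p => PySem.Str.isIn p u) then "VEOG"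
  else if ["HEOG", "HEOGL", "HEOGR"].any (fun p => PySem.Str.isIn p u) then "HEOG"
  else if PySem.Str.isIn "EOG" u then "EOG"
  else if ["EMG", "MUSCLE"].any (fun p => PySem.Str.isIn p u) then "EMG"
  else if ["ECG", "EKG"].any (fun p => PySem.Str.isIn p u) then "ECG"
  else if ["STIM", "STI", "TRIGGER", "EVENT", "MARKER"].any (fun p => PySem.Str.isIn p u) then "Markers"
  else if ["FP", "F", "C", "P", "O", "T", "AF", "FC", "CP", "PO", "TP", "Z"].any (fun p => PySem.Str.isIn p u) then "EEG"
  else default_type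

def infer_channel_types_from_labels (labels : List String) (default_type : String) : List String :=
  labels.foldl (fun inferred_types label =>
    inferred_types ++ [pvCascadeA (PySem.Str.strip (PySem.Str.upper label)) default_type]) []

-- ===== PORT B =====
def pvTypes : List String := ["AUX", "VEOG", "HEOG", "EOG", "EMG", "ECG", "Markers", "EEG"]

def pvRank : PySem.Dict String Nat := PySem.Dict.ofList
  [("AUX", 0), ("AUXILIARY", 0),
   ("VEOG", 1), ("VEOGL", 1), ("VEOGR", 1),
   ("HEOG", 2), ("HEOGL", 2), ("HEOGR", 2),
   ("EOG", 3),
   ("EMG", 4), ("MUSCLE", 4),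
   ("ECG", 5), ("EKG", 5),
   ("STIM", 6), ("STI", 6), ("TRIGGER", 6), ("EVENT", 6), ("MARKER", 6),
   ("FP", 7), ("F", 7), ("C", 7), ("P", 7), ("O", 7), ("T", 7),
   ("AF", 7), ("FC", 7), ("CP", 7), ("PO", 7), ("TP", 7), ("Z", 7)]

def pvLens : List Int := [1, 2, 3, 4, 5, 6, 7, 9]

-- Source B's `for i in range(len(u)): for n in LENGTHS: r = RANK.get(u[i:i+n]); …` min-priority scan
def pvBest (u : String) : Nat :=
  (PySem.List.pyRange 0 (PySem.Str.len u) 1).foldl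
    (fun best i => pvLens.foldl
      (fun best n =>
        match pvRank.get? (PySem.Str.slice u (some i) (some (i + n))) with
        | some r => if r < best then r else best
        | none => best) best)
    pvTypes.length

def infer_channel_types_from_labels_alt (labels : List String) (default_type : String) : List String :=
  labels.foldl (fun out label =>
    let best := pvBest (PySem.Str.strip (PySem.Str.upper label))
    -- TYPES[best] with the guard best < len(TYPES): exact, getD hits the in-range case only
    out ++ [if best < pvTypes.length then pvTypes.getD best default_type else default_type]) []

-- ===== PRECONDITION & SPEC =====
def Spec_infer_channel_types_from_labels (labels : List String) (default_type : String) (out : List String) : Prop := out = infer_channel_types_from_labels_alt labels default_type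
instance (labels : List String) (default_type : String) (out : List String) : Decidable (Spec_infer_channel_types_from_labels labels default_type out) := by unfold Spec_infer_channel_types_from_labels; infer_instance

-- ===== CLAIM (what is proved, stated in full; the proofs are below) =====
def Claim_equal_infer_channel_types_from_labels : Prop := ∀ (labels : List String) (default_type : String), Dom_infer_channel_types_from_labels labels default_type → Spec_infer_channel_types_from_labels labels default_type (infer_channel_types_from_labels labels default_type)

-- ===== LEMMAS AND PROOFS =====

-- A's cascade branches as an indexed pattern table (proof-only view of the cascade)
def pvBranchPatterns : Nat → List String
  | 0 => ["AUX", "AUXILIARY"]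
  | 1 => ["VEOG", "VEOGL", "VEOGR"]
  | 2 => ["HEOG", "HEOGL", "HEOGR"]
  | 3 => ["EOG"]
  | 4 => ["EMG", "MUSCLE"]
  | 5 => ["ECG", "EKG"]
  | 6 => ["STIM", "STI", "TRIGGER", "EVENT", "MARKER"]
  | 7 => ["FP", "F", "C", "P", "O", "T", "AF", "FC", "CP", "PO", "TP", "Z"]
  | _ => []

def pvPairs (u : String) : List (Int × Int) :=
  (PySem.List.pyRange 0 (PySem.Str.len u) 1).flatMap (fun i => pvLens.map (fun n => (i, n)))

def pvLookup (u : String) (x : Int × Int) : Option Nat :=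
  pvRank.get? (PySem.Str.slice u (some x.1) (some (x.1 + x.2)))

def pvStep (u : String) (best : Nat) (x : Int × Int) : Nat :=
  match pvLookup u x with
  | some r => if r < best then r else best
  | none => best

theorem pvBest_eq_flat (u : String) : pvBest u = (pvPairs u).foldl (pvStep u) 8 := by
  unfold pvBest pvPairs
  rw [List.foldl_flatMap]
  simp [List.foldl_map, pvStep, pvLookup, pvTypes]

theorem pvFoldl_step_le_init (u : String) (l : List (Int × Int)) (a : Nat) :
    l.foldl (pvStep u) a ≤ a := by
  induction l generalizing a with
  | nil => simp
  | cons x t ih =>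
      refine le_trans (ih (pvStep u a x)) ?_
      unfold pvStep
      cases pvLookup u x with
      | none => exact le_refl a
      | some r =>
          by_cases hra : r < a
          · simp only [if_pos hra]; omega
          · simp only [if_neg hra]; exact le_refl a

theorem pvFoldl_step_le_found (u : String) (l : List (Int × Int)) (a : Nat)
    (x : Int × Int) (hx : x ∈ l) (r : Nat) (hr : pvLookup u x = some r) :
    l.foldl (pvStep u) a ≤ r := by
  induction l generalizing a with
  | nil => simp at hx
  | cons y t ih =>
      rcases List.mem_cons.mp hx with rfl | hm
      · rw [List.foldl_cons]
        refine le_trans (pvFoldl_step_le_init u t (pvStep u a x)) ?_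
        unfold pvStep
        rw [hr]
        by_cases hra : r < a
        · simp only [if_pos hra]; exact le_refl r
        · simp only [if_neg hra]; omega
      · rw [List.foldl_cons]
        exact ih (pvStep u a y) hm

theorem pvFoldl_step_cases (u : String) (l : List (Int × Int)) (a : Nat) :
    l.foldl (pvStep u) a = a ∨ ∃ x ∈ l, pvLookup u x = some (l.foldl (pvStep u) a) := by
  induction l generalizing a with
  | nil => exact Or.inl rfl
  | cons y t ih =>
      rw [List.foldl_cons]
      rcases ih (pvStep u a y) with h | ⟨x, hx, hl⟩
      · rw [h]
        cases hcl : pvLookup u y with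
        | none => left; simp [pvStep, hcl]
        | some r =>
            by_cases hra : r < a
            · exact Or.inr ⟨y, List.mem_cons_self, by simp [pvStep, hcl, hra]⟩
            · left; simp [pvStep, hcl, hra]
      · exact Or.inr ⟨x, List.mem_cons_of_mem _ hx, hl⟩

theorem pvSlice_toList (u : String) (i n : Int) (h0 : 0 ≤ i) (hn : 0 ≤ n) :
    (PySem.Str.slice u (some i) (some (i + n))).toList = (u.toList.drop i.toNat).take n.toNat := by
  rw [PySem.Str.toList_slice, PySem.Chars.slice_eq_listSlice,
    PySem.List.slice_toNat u.toList h0 (by omega)]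
  congr 1
  omega

theorem pvPattern_facts (k : Nat) (p : String) (hp : p ∈ pvBranchPatterns k) :
    p.toList ≠ [] ∧ ((p.toList.length : Int) ∈ pvLens) ∧ pvRank.get? p = some k := by
  rcases k with _|_|_|_|_|_|_|_|k
  · fin_cases hp
    · decide
    · decide
  · fin_cases hp <;> decide
  · fin_cases hp <;> decide
  · fin_cases hp <;> decide
  · fin_cases hp <;> decide
  · fin_cases hp <;> decide
  · fin_cases hp <;> decide
  · fin_cases hp <;> decide
  · simp [pvBranchPatterns] at hp

theorem pvRank_mem (s : String) (r : Nat) (h : pvRank.get? s = some r) :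
    s ∈ pvBranchPatterns r := by
  have hm := PySem.Dict.mem_items_of_get?_eq_some _ h
  have hitems : pvRank.items =
    [("AUX", 0), ("AUXILIARY", 0), ("VEOG", 1), ("VEOGL", 1), ("VEOGR", 1),
     ("HEOG", 2), ("HEOGL", 2), ("HEOGR", 2), ("EOG", 3), ("EMG", 4), ("MUSCLE", 4),
     ("ECG", 5), ("EKG", 5), ("STIM", 6), ("STI", 6), ("TRIGGER", 6), ("EVENT", 6),
     ("MARKER", 6), ("FP", 7), ("F", 7), ("C", 7), ("P", 7), ("O", 7), ("T", 7),
     ("AF", 7), ("FC", 7), ("CP", 7), ("PO", 7), ("TP", 7), ("Z", 7)] := by decide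
  rw [hitems] at hm
  fin_cases hm <;> decide

theorem pvBest_le_of_match (u p : String) (k : Nat)
    (hp : p ∈ pvBranchPatterns k) (hin : PySem.Str.isIn p u = true) : pvBest u ≤ k := by
  obtain ⟨hne, hlen, hrank⟩ := pvPattern_facts k p hp
  rw [PySem.Str.isIn_iff_infix] at hin
  obtain ⟨s, t, hst⟩ := hin
  rw [pvBest_eq_flat]
  refine pvFoldl_step_le_found u _ 8 ((s.length : Int), (p.toList.length : Int)) ?_ k ?_
  · simp only [pvPairs, List.mem_flatMap, List.mem_map]
    refine ⟨(s.length : Int), ?_, ⟨(p.toList.length : Int), hlen, rfl⟩⟩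
    rw [PySem.List.mem_pyRange_one]
    constructor
    · exact_mod_cast Nat.zero_le _
    · have hlen_u : u.toList.length = s.length + p.toList.length + t.length := by
        rw [← hst]; simp only [List.length_append]
      have hpne : 0 < p.toList.length := List.length_pos_iff.mpr hne
      rw [PySem.Str.len_eq]
      exact_mod_cast by omega
  · unfold pvLookup
    have hsl : (PySem.Str.slice u (some (s.length : Int))
        (some ((s.length : Int) + (p.toList.length : Int)))).toList = p.toList := by
      rw [pvSlice_toList u _ _ (by positivity) (by positivity)]
      have : u.toList = s ++ (p.toList ++ t) := by rw [← hst]; simp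
      simp [this, Int.toNat_natCast]
    have := String.toList_inj.mp hsl
    rw [this, hrank]

theorem pvBest_match (u : String) (h : pvBest u < 8) :
    ∃ p ∈ pvBranchPatterns (pvBest u), PySem.Str.isIn p u = true := by
  rcases pvFoldl_step_cases u (pvPairs u) 8 with h8 | ⟨x, hx, hlook⟩
  · rw [pvBest_eq_flat] at h; omega
  · rw [← pvBest_eq_flat] at hlook
    refine ⟨_, pvRank_mem _ _ hlook, ?_⟩
    rw [PySem.Str.isIn_iff_infix]
    have hx1 : 0 ≤ x.1 := by
      simp only [pvPairs, List.mem_flatMap, List.mem_map] at hx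
      obtain ⟨i, hi, n, _, rfl⟩ := hx
      exact (PySem.List.mem_pyRange_one.mp hi).1
    have hx2 : 0 ≤ x.2 := by
      simp only [pvPairs, List.mem_flatMap, List.mem_map] at hx
      obtain ⟨i, _, n, hn, rfl⟩ := hx
      fin_cases hn <;> norm_num
    rw [pvSlice_toList u x.1 x.2 hx1 hx2]
    exact ((List.take_prefix _ _).isInfix).trans ((List.drop_suffix _ _).isInfix)

theorem pvLe_best_of_no_match (u : String) (k : Nat) (hk : k ≤ 8)
    (h : ∀ j, j < k → ∀ p ∈ pvBranchPatterns j, PySem.Str.isIn p u = false) :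
    k ≤ pvBest u := by
  by_contra hlt
  have hb : pvBest u < 8 := by omega
  obtain ⟨p, hp, hin⟩ := pvBest_match u hb
  have := h (pvBest u) (by omega) p hp
  rw [hin] at this
  simp at this

theorem pvClassify_eq (u d : String) :
    pvCascadeA u d = (if pvBest u < pvTypes.length then pvTypes.getD (pvBest u) d else d) := by
  have hTlen : pvTypes.length = 8 := rfl
  unfold pvCascadeA
  by_cases h0 : (["AUX", "AUXILIARY"].any (fun p => PySem.Str.isIn p u)) = true
  · rw [if_pos h0]
    obtain ⟨p, hp, hin⟩ := List.any_eq_true.mp h0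
    have hle := pvBest_le_of_match u p 0 (by simpa [pvBranchPatterns] using hp) hin
    have hb : pvBest u = 0 := by omega
    rw [hb, hTlen]
    simp [pvTypes]
  · rw [if_neg h0]
    have hn0 : ∀ p ∈ pvBranchPatterns 0, PySem.Str.isIn p u = false :=
      by intro p hp; fin_cases hp <;> simp_all
    by_cases h1 : (["VEOG", "VEOGL", "VEOGR"].any (fun p => PySem.Str.isIn p u)) = true
    · rw [if_pos h1]
      obtain ⟨p, hp, hin⟩ := List.any_eq_true.mp h1
      have hle := pvBest_le_of_match u p 1 (by simpa [pvBranchPatterns] using hp) hin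
      have hge := pvLe_best_of_no_match u 1 (by omega) (by
        intro j hj p hp
        interval_cases j
        · exact hn0 p hp)
      have hb : pvBest u = 1 := by omega
      rw [hb, hTlen]; simp [pvTypes]
    · rw [if_neg h1]
      have hn1 : ∀ p ∈ pvBranchPatterns 1, PySem.Str.isIn p u = false := by
        intro p hp; fin_cases hp <;> simp_all
      by_cases h2 : (["HEOG", "HEOGL", "HEOGR"].any (fun p => PySem.Str.isIn p u)) = true
      · rw [if_pos h2]
        obtain ⟨p, hp, hin⟩ := List.any_eq_true.mp h2
        have hle := pvBest_le_of_match u p 2 (by simpa [pvBranchPatterns] using hp) hin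
        have hge := pvLe_best_of_no_match u 2 (by omega) (by
          intro j hj p hp
          interval_cases j
          · exact hn0 p hp
          · exact hn1 p hp)
        have hb : pvBest u = 2 := by omega
        rw [hb, hTlen]; simp [pvTypes]
      · rw [if_neg h2]
        have hn2 : ∀ p ∈ pvBranchPatterns 2, PySem.Str.isIn p u = false := by
          intro p hp; fin_cases hp <;> simp_all
        by_cases h3 : PySem.Str.isIn "EOG" u = true
        · rw [if_pos h3]
          have hle := pvBest_le_of_match u "EOG" 3 (by simp [pvBranchPatterns]) h3
          have hge := pvLe_best_of_no_match u 3 (by omega) (by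
            intro j hj p hp
            interval_cases j
            · exact hn0 p hp
            · exact hn1 p hp
            · exact hn2 p hp)
          have hb : pvBest u = 3 := by omega
          rw [hb, hTlen]; simp [pvTypes]
        · rw [if_neg h3]
          have hn3 : ∀ p ∈ pvBranchPatterns 3, PySem.Str.isIn p u = false := by
            intro p hp
            fin_cases hp
            simpa using h3
          by_cases h4 : (["EMG", "MUSCLE"].any (fun p => PySem.Str.isIn p u)) = true
          · rw [if_pos h4]
            obtain ⟨p, hp, hin⟩ := List.any_eq_true.mp h4
            have hle := pvBest_le_of_match u p 4 (by simpa [pvBranchPatterns] using hp) hin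
            have hge := pvLe_best_of_no_match u 4 (by omega) (by
              intro j hj p hp
              interval_cases j
              · exact hn0 p hp
              · exact hn1 p hp
              · exact hn2 p hp
              · exact hn3 p hp)
            have hb : pvBest u = 4 := by omega
            rw [hb, hTlen]; simp [pvTypes]
          · rw [if_neg h4]
            have hn4 : ∀ p ∈ pvBranchPatterns 4, PySem.Str.isIn p u = false := by
              intro p hp; fin_cases hp <;> simp_all
            by_cases h5 : (["ECG", "EKG"].any (fun p => PySem.Str.isIn p u)) = true
            · rw [if_pos h5]
              obtain ⟨p, hp, hin⟩ := List.any_eq_true.mp h5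
              have hle := pvBest_le_of_match u p 5 (by simpa [pvBranchPatterns] using hp) hin
              have hge := pvLe_best_of_no_match u 5 (by omega) (by
                intro j hj p hp
                interval_cases j
                · exact hn0 p hp
                · exact hn1 p hp
                · exact hn2 p hp
                · exact hn3 p hp
                · exact hn4 p hp)
              have hb : pvBest u = 5 := by omega
              rw [hb, hTlen]; simp [pvTypes]
            · rw [if_neg h5]
              have hn5 : ∀ p ∈ pvBranchPatterns 5, PySem.Str.isIn p u = false := by
                intro p hp; fin_cases hp <;> simp_all
              by_cases h6 : (["STIM", "STI", "TRIGGER", "EVENT", "MARKER"].any (fun p => PySem.Str.isIn p u)) = true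
              · rw [if_pos h6]
                obtain ⟨p, hp, hin⟩ := List.any_eq_true.mp h6
                have hle := pvBest_le_of_match u p 6 (by simpa [pvBranchPatterns] using hp) hin
                have hge := pvLe_best_of_no_match u 6 (by omega) (by
                  intro j hj p hp
                  interval_cases j
                  · exact hn0 p hp
                  · exact hn1 p hp
                  · exact hn2 p hp
                  · exact hn3 p hp
                  · exact hn4 p hp
                  · exact hn5 p hp)
                have hb : pvBest u = 6 := by omega
                rw [hb, hTlen]; simp [pvTypes]
              · rw [if_neg h6]
                have hn6 : ∀ p ∈ pvBranchPatterns 6, PySem.Str.isIn p u = false := by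
                  intro p hp; fin_cases hp <;> simp_all
                by_cases h7 : (["FP", "F", "C", "P", "O", "T", "AF", "FC", "CP", "PO", "TP", "Z"].any (fun p => PySem.Str.isIn p u)) = true
                · rw [if_pos h7]
                  obtain ⟨p, hp, hin⟩ := List.any_eq_true.mp h7
                  have hle := pvBest_le_of_match u p 7 (by simpa [pvBranchPatterns] using hp) hin
                  have hge := pvLe_best_of_no_match u 7 (by omega) (by
                    intro j hj p hp
                    interval_cases j
                    · exact hn0 p hp
                    · exact hn1 p hp
                    · exact hn2 p hp
                    · exact hn3 p hp
                    · exact hn4 p hp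
                    · exact hn5 p hp
                    · exact hn6 p hp)
                  have hb : pvBest u = 7 := by omega
                  rw [hb, hTlen]; simp [pvTypes]
                · rw [if_neg h7]
                  have hn7 : ∀ p ∈ pvBranchPatterns 7, PySem.Str.isIn p u = false := by
                    intro p hp; fin_cases hp <;> simp_all
                  have hge := pvLe_best_of_no_match u 8 (by omega) (by
                    intro j hj p hp
                    interval_cases j
                    · exact hn0 p hp
                    · exact hn1 p hp
                    · exact hn2 p hp
                    · exact hn3 p hp
                    · exact hn4 p hp
                    · exact hn5 p hp
                    · exact hn6 p hp
                    · exact hn7 p hp)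
                  rw [hTlen, if_neg (by omega)]

-- ===== VERDICT (by name: the statement is the Claim_ definition above) =====
theorem infer_channel_types_from_labels_spec : Claim_equal_infer_channel_types_from_labels := by
  intro labels default_type _
  unfold Spec_infer_channel_types_from_labels infer_channel_types_from_labels
    infer_channel_types_from_labels_alt
  rw [PySem.List.foldl_append_singleton_eq_map, PySem.List.foldl_append_singleton_eq_map]
  exact List.map_congr_left (fun l _ => pvClassify_eq (PySem.Str.strip (PySem.Str.upper l)) default_type)
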